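-- pv_equiv track=rewrite | github.com/dzwdz/oi30 | ply/ply.py | depthvis
-- ===== SOURCE A (Python) =====
-- def depthvis(a):
--     r = ""
--     depth = 0
--     for c in a:
--         if c == "(":
--             depth += 1
--         elif c == ")":
--             depth -= 1
--         r += str(depth)
--     return r
-- ===== SOURCE B (Python) =====
-- from bisect import bisect_right
--
-- def depthvis(a):
--     opens = [i for i, ch in enumerate(a) if ch == "("]
--     closes = [i for i, ch in enumerate(a) if ch == ")"]
--     return "".join(
--         str(bisect_right(opens, i) - bisect_right(closes, i))
--         for i in range(len(a))
--     )
-- ===== Notes on version B (the rewrite author's own statement) =====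
-- stated objective: alternative
-- what changed: Replaces the stateful single pass maintaining a running depth counter with an index-based algorithm: it collects the sorted position lists of the open and close parentheses once, then computes the depth at each position as the difference of two bisect_right binary searches over those lists, joined once.
import Mathlib
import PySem

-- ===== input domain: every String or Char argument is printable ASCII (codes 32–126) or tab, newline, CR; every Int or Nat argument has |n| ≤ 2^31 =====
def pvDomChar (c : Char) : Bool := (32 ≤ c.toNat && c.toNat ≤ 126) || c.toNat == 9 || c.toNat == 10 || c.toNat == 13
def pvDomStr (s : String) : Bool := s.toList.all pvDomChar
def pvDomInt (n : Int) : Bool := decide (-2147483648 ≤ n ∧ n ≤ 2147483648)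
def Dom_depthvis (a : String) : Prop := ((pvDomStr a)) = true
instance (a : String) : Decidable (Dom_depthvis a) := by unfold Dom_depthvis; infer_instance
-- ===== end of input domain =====

-- B replaces the stateful running-depth pass by an index-based algorithm: it collects the
-- position lists of '(' and ')' once and binary-searches them per position; objective: alternative.

-- ===== PORT A =====
-- literal port of A: one fold carrying (r, depth), appending str(depth) each step
def depthvis (a : String) : String :=
  (a.toList.foldl
    (fun (st : String × Int) c =>
      let depth := if c = '(' then st.2 + 1 else if c = ')' then st.2 - 1 else st.2
      (st.1 ++ PySem.Int.toStr depth, depth))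
    ("", 0)).1

-- ===== PORT B =====
-- [i for i, ch in enumerate(a) if ch == c]
def pvPositions (l : List Char) (c : Char) : List Int :=
  ((l.zipIdx 0).filter (fun p => p.1 == c)).map (fun p => (p.2 : Int))

-- bisect.bisect_right(xs, x) restricted to the window [lo, hi): standard binary search
def pvBisect (xs : List Int) (x : Int) (lo hi : Nat) : Nat :=
  if _h : lo < hi then
    let mid := (lo + hi) / 2
    if x < xs.getD mid 0 then pvBisect xs x lo mid
    else pvBisect xs x (mid + 1) hi
  else lo
termination_by hi - lo
decreasing_by all_goals omega

-- ''.join(str(bisect_right(opens, i) - bisect_right(closes, i)) for i in range(len(a)))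
def depthvis_alt (a : String) : String :=
  (((List.range a.toList.length).map (fun (i : Nat) =>
      PySem.Int.toStr ((pvBisect (pvPositions a.toList '(') (i : Int) 0
          (pvPositions a.toList '(').length : Int)
        - (pvBisect (pvPositions a.toList ')') (i : Int) 0
          (pvPositions a.toList ')').length : Int)))).foldr (· ++ ·) "")

-- ===== PRECONDITION & SPEC =====
def Spec_depthvis (a : String) (out : String) : Prop := out = depthvis_alt a
instance (a : String) (out : String) : Decidable (Spec_depthvis a out) := by unfold Spec_depthvis; infer_instance

-- ===== CLAIM (what is proved, stated in full; the proofs are below) =====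
def Claim_equal_depthvis : Prop := ∀ (a : String), Dom_depthvis a → Spec_depthvis a (depthvis a)

-- ===== LEMMAS AND PROOFS =====

-- net paren delta of a list of characters
def pvNet (l : List Char) : Int := (l.count '(' : Int) - (l.count ')' : Int)

theorem pvNet_append (p q : List Char) : pvNet (p ++ q) = pvNet p + pvNet q := by
  simp [pvNet, List.count_append]; omega

-- positions (Nat, with offset k) of character c in l
def pvPosList : List Char → Nat → Char → List Nat
  | [], _, _ => []
  | x :: xs, k, c => if x = c then k :: pvPosList xs (k + 1) c else pvPosList xs (k + 1) c

theorem pvPositions_eq (l : List Char) (c : Char) :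
    ∀ k, ((l.zipIdx k).filter (fun p => p.1 == c)).map (fun p => (p.2 : Int))
      = (pvPosList l k c).map (fun (m : Nat) => (m : Int)) := by
  induction l with
  | nil => intro k; simp [pvPosList]
  | cons x xs ih =>
    intro k
    by_cases hx : x = c <;>
      simp [List.zipIdx, pvPosList, hx, List.filter_cons, ih (k + 1)]

theorem pvPosList_lb (l : List Char) (c : Char) :
    ∀ k, ∀ m ∈ pvPosList l k c, k ≤ m := by
  induction l with
  | nil => intro k m hm; simp [pvPosList] at hm
  | cons x xs ih =>
    intro k m hm
    by_cases hx : x = c <;> simp [pvPosList, hx] at hm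
    · rcases hm with rfl | hm
      · omega
      · have := ih (k + 1) m hm; omega
    · have := ih (k + 1) m hm; omega

theorem pvPosList_sorted (l : List Char) (c : Char) :
    ∀ k, (pvPosList l k c).Pairwise (· < ·) := by
  induction l with
  | nil => intro k; simp [pvPosList]
  | cons x xs ih =>
    intro k
    by_cases hx : x = c <;> simp [pvPosList, hx]
    · exact ⟨fun m hm => by have := pvPosList_lb xs c (k + 1) m hm; omega, ih (k + 1)⟩
    · exact ih (k + 1)

-- countP (· ≤ i) on the position list = count of c among the first i+1-k characters
theorem pvPosList_countP (l : List Char) (c : Char) (i : Nat) :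
    ∀ k, (pvPosList l k c).countP (fun m => decide (m ≤ i)) = (l.take (i + 1 - k)).count c := by
  induction l with
  | nil => intro k; simp [pvPosList]
  | cons x xs ih =>
    intro k
    by_cases hk : k ≤ i
    · have ht : (x :: xs).take (i + 1 - k) = x :: xs.take (i - k) := by
        have : i + 1 - k = (i - k) + 1 := by omega
        rw [this, List.take_succ_cons]
      have hih : (pvPosList xs (k + 1) c).countP (fun m => decide (m ≤ i))
          = (xs.take (i - k)).count c := by
        have : i + 1 - (k + 1) = i - k := by omega
        rw [ih (k + 1), this]
      by_cases hx : x = c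
      · subst hx
        simp [pvPosList, ht, hih, List.countP_cons, List.count_cons, hk]
      · simp [pvPosList, hx, ht, hih, List.count_cons, hk]
    · have ht : i + 1 - k = 0 := by omega
      have hih : (pvPosList xs (k + 1) c).countP (fun m => decide (m ≤ i)) = 0 := by
        rw [ih (k + 1), show i + 1 - (k + 1) = 0 by omega]; simp
      by_cases hx : x = c <;>
        simp [pvPosList, hx, ht, hih, List.countP_cons, show ¬ k ≤ i from hk]

-- on a strictly increasing list, (os[j] ≤ i) holds exactly for j below the countP cut
theorem cut_of_sorted (os : List Nat) (hs : os.Pairwise (· < ·)) (i : Nat) :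
    ∀ j, j < os.length → (os.getD j 0 ≤ i ↔ j < os.countP (fun m => decide (m ≤ i))) := by
  induction os with
  | nil => intro j hj; simp at hj
  | cons a t ih =>
    intro j hj
    rcases List.pairwise_cons.mp hs with ⟨ha, ht⟩
    by_cases hai : a ≤ i
    · have hcp : (a :: t).countP (fun m => decide (m ≤ i))
          = t.countP (fun m => decide (m ≤ i)) + 1 := by
        simp [List.countP_cons, hai]
      cases j with
      | zero => simp [hcp, hai]
      | succ j =>
        simp only [List.getD_cons_succ, hcp]
        rw [ih ht j (by simpa using hj)]
        omega
    · have hta : ∀ m ∈ t, ¬ m ≤ i := fun m hm => by have := ha m hm; omega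
      have ht0 : t.countP (fun m => decide (m ≤ i)) = 0 :=
        List.countP_eq_zero.mpr (fun m hm => by simpa using hta m hm)
      have hcp : (a :: t).countP (fun m => decide (m ≤ i)) = 0 := by
        simp [List.countP_cons, hai, ht0]
      cases j with
      | zero => simp [hcp, hai]
      | succ j =>
        simp only [List.getD_cons_succ, hcp]
        constructor
        · intro h
          rw [List.getD_eq_getElem _ _ (by simpa using hj)] at h
          exact absurd h (hta _ (List.getElem_mem _))
        · omega

-- binary search returns the cut point k whenever (xs[j] ≤ x ↔ j < k) on the window
theorem pvBisect_eq (xs : List Int) (x : Int) (k : Nat)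
    (hchar : ∀ j, j < xs.length → (xs.getD j 0 ≤ x ↔ j < k)) :
    ∀ lo hi, lo ≤ k → k ≤ hi → hi ≤ xs.length → pvBisect xs x lo hi = k := by
  intro lo hi
  induction hn : hi - lo using Nat.strong_induction_on generalizing lo hi with
  | _ n ih =>
    intro h1 h2 h3
    by_cases hlh : lo < hi
    · rw [pvBisect]
      simp only [dif_pos hlh]
      have hmid2 : (lo + hi) / 2 < hi := by omega
      by_cases hx : x < xs.getD ((lo + hi) / 2) 0
      · have hk : k ≤ (lo + hi) / 2 := by
          by_contra hcon
          push_neg at hcon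
          have := (hchar ((lo + hi) / 2) (by omega)).mpr hcon
          omega
        rw [if_pos hx]
        exact ih ((lo + hi) / 2 - lo) (by omega) lo ((lo + hi) / 2) rfl h1 hk (by omega)
      · have hk : (lo + hi) / 2 < k := by
          exact (hchar ((lo + hi) / 2) (by omega)).mp (by omega)
        rw [if_neg hx]
        exact ih (hi - ((lo + hi) / 2 + 1)) (by omega) ((lo + hi) / 2 + 1) hi rfl
          (by omega) h2 h3
    · rw [pvBisect]
      simp only [dif_neg hlh]
      omega

theorem getD_map_cast (os : List Nat) (j : Nat) (hj : j < os.length) :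
    (os.map (fun (m : Nat) => (m : Int))).getD j 0 = (os.getD j 0 : Int) := by
  rw [List.getD_eq_getElem _ _ (by simpa using hj), List.getD_eq_getElem _ _ hj]
  exact List.getElem_map _

-- the binary search over the position list of c computes the prefix count of c
theorem pvBisect_positions (l : List Char) (c : Char) (i : Nat) :
    pvBisect (pvPositions l c) (i : Int) 0 (pvPositions l c).length
      = (l.take (i + 1)).count c := by
  have hP : pvPositions l c = (pvPosList l 0 c).map (fun (m : Nat) => (m : Int)) := by
    unfold pvPositions; exact pvPositions_eq l c 0
  set os := pvPosList l 0 c with hos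
  set k := os.countP (fun m => decide (m ≤ i)) with hk
  have hkl : k ≤ os.length := List.countP_le_length
  have hchar : ∀ j, j < (pvPositions l c).length →
      ((pvPositions l c).getD j 0 ≤ (i : Int) ↔ j < k) := by
    intro j hj
    have hj' : j < os.length := by
      simpa [hP] using hj
    rw [hP, getD_map_cast os j hj', Nat.cast_le]
    exact cut_of_sorted os (pvPosList_sorted l c 0) i j hj'
  have hlen : (pvPositions l c).length = os.length := by simp [hP]
  have := pvBisect_eq (pvPositions l c) (i : Int) k hchar 0 (pvPositions l c).length
    (by omega) (by omega) (by omega)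
  rw [this, hk, pvPosList_countP l c i 0]
  simp

-- the loop of A, started at depth pvNet p with output r, appends the
-- stringified prefix-nets of p ++ l at the positions of l
theorem depthvis_loop (l p : List Char) (r : String) :
    (l.foldl
      (fun (st : String × Int) c =>
        let depth := if c = '(' then st.2 + 1 else if c = ')' then st.2 - 1 else st.2
        (st.1 ++ PySem.Int.toStr depth, depth))
      (r, pvNet p)).1
    = r ++ ((List.range l.length).map
        (fun i => PySem.Int.toStr (pvNet p + pvNet (l.take (i + 1))))).foldr (· ++ ·) "" := by
  induction l generalizing p r with
  | nil => simp [String.append_empty]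
  | cons c l ih =>
    have hd : (if c = '(' then pvNet p + 1 else if c = ')' then pvNet p - 1 else pvNet p)
        = pvNet (p ++ [c]) := by
      rw [pvNet_append]
      have hc : pvNet [c] = if c = '(' then 1 else if c = ')' then -1 else 0 := by
        unfold pvNet; split_ifs with h1 h2 <;> simp [h1] <;> simp_all
      rw [hc]; split_ifs <;> omega
    have hmap : (List.range (c :: l).length).map
          (fun i => PySem.Int.toStr (pvNet p + pvNet ((c :: l).take (i + 1))))
        = PySem.Int.toStr (pvNet (p ++ [c]))
          :: (List.range l.length).map
              (fun i => PySem.Int.toStr (pvNet (p ++ [c]) + pvNet (l.take (i + 1)))) := by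
      simp only [List.length_cons, List.range_succ_eq_map, List.map_cons, List.map_map]
      congr 1
      · rw [pvNet_append]
        have : (c :: l).take (0 + 1) = [c] := by simp
        rw [this]
      · apply List.map_congr_left
        intro i _
        simp only [Function.comp_apply]
        congr 1
        have ht : (c :: l).take (i + 1 + 1) = c :: l.take (i + 1) := by simp
        rw [ht, show (c :: l.take (i + 1)) = [c] ++ l.take (i + 1) from rfl,
          pvNet_append, pvNet_append]
        ring
    simp only [List.foldl_cons, hd]
    rw [ih (p ++ [c]), hmap, List.foldr_cons, String.append_assoc]

-- ===== VERDICT (by name: the statement is the Claim_ definition above) =====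
theorem depthvis_spec : Claim_equal_depthvis := by
  intro a _
  unfold Spec_depthvis depthvis depthvis_alt
  have hloop := depthvis_loop a.toList [] ""
  simp only [show pvNet [] = 0 from rfl] at hloop
  rw [hloop]
  have hm : (List.range a.toList.length).map (fun (i : Nat) =>
        PySem.Int.toStr ((pvBisect (pvPositions a.toList '(') (i : Int) 0
            (pvPositions a.toList '(').length : Int)
          - (pvBisect (pvPositions a.toList ')') (i : Int) 0
            (pvPositions a.toList ')').length : Int)))
      = (List.range a.toList.length).map
          (fun i => PySem.Int.toStr (0 + pvNet (a.toList.take (i + 1)))) := by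
    apply List.map_congr_left
    intro i _
    rw [pvBisect_positions a.toList '(' i, pvBisect_positions a.toList ')' i, zero_add]
    rfl
  rw [hm]
  simp
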